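-- pv_equiv track=rewrite | github.com/cce2955/TvCGUI-Main | tdp-modules/tvc_experiments/probe_live.py | find_markers
-- ===== SOURCE A (Python) =====
-- def find_markers(buf):
--     markers = []
--     n = len(buf)
--     i = 0
--     while i <= n - 3:
--         if buf[i] == 0x01:
--             m_id  = buf[i+1]
--             kind  = buf[i+2]
--             if kind in (0x01, 0x04):
--                 markers.append((i, m_id, kind))
--                 i += 3
--                 continue
--         i += 1
--     return markers
-- ===== SOURCE B (Python) =====
-- def find_markers(buf):
--     n = len(buf)
--     cands = [i for i in range(n - 2) if buf[i] == 0x01 and buf[i + 2] in (0x01, 0x04)]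
--     markers = []
--     nxt = 0
--     for i in cands:
--         if i >= nxt:
--             markers.append((i, buf[i + 1], buf[i + 2]))
--             nxt = i + 3
--     return markers
-- ===== Notes on version B (the rewrite author's own statement) =====
-- stated objective: alternative
-- what changed: Replaces A's stateful advance-by-3-on-hit/advance-by-1-on-miss index loop with a two-phase scheme: a comprehension first collects every candidate marker position, then a greedy threshold pass selects the leftmost non-overlapping ones.
import Mathlib
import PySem

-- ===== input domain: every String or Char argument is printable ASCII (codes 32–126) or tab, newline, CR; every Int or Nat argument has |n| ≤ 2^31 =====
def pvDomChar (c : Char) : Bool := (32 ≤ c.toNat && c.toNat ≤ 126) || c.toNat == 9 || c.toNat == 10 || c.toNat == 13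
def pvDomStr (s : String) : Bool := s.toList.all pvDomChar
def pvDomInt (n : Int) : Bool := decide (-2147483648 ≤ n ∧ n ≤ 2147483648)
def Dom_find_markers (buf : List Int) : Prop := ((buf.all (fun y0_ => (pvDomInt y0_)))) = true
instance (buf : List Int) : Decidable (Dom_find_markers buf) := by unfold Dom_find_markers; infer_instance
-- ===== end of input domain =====

-- B is an alternative, equally-costly decomposition: collect candidate positions, then greedily
-- keep the leftmost non-overlapping ones (proved to return the same value as A on all inputs).

-- ===== PORT A =====
-- loop of A: while i <= n - 3, advance by 3 on a recorded marker, by 1 otherwise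
def goA (buf : List Int) (i : Nat) (acc : List (Int × Int × Int)) : List (Int × Int × Int) :=
  if i + 3 ≤ buf.length then
    if buf.getD i 0 = 1 then
      if buf.getD (i + 2) 0 = 1 ∨ buf.getD (i + 2) 0 = 4 then
        goA buf (i + 3) (acc ++ [((i : Int), buf.getD (i + 1) 0, buf.getD (i + 2) 0)])
      else
        goA buf (i + 1) acc
    else
      goA buf (i + 1) acc
  else acc
termination_by buf.length - i
decreasing_by all_goals omega

def find_markers (buf : List Int) : List (Int × Int × Int) := goA buf 0 []

-- ===== PORT B =====
-- candidate test of Source B's comprehension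
def hitB (buf : List Int) (j : Nat) : Bool :=
  (buf.getD j 0 == 1) && ((buf.getD (j + 2) 0 == 1) || (buf.getD (j + 2) 0 == 4))

-- the body of Source B's `for i in cands` loop (state = (markers, nxt))
def stepB (buf : List Int) (st : List (Int × Int × Int) × Nat) (i : Nat) :
    List (Int × Int × Int) × Nat :=
  if st.2 ≤ i then (st.1 ++ [((i : Int), buf.getD (i + 1) 0, buf.getD (i + 2) 0)], i + 3) else st

def find_markers_alt (buf : List Int) : List (Int × Int × Int) :=
  let n := buf.length
  let cands := (List.range (n - 2)).filter (hitB buf)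
  (cands.foldl (stepB buf) ([], 0)).1

-- ===== PRECONDITION & SPEC =====
def Spec_find_markers (buf : List Int) (out : List (Int × Int × Int)) : Prop := out = find_markers_alt buf
instance (buf : List Int) (out : List (Int × Int × Int)) : Decidable (Spec_find_markers buf out) := by unfold Spec_find_markers; infer_instance

-- ===== CLAIM (what is proved, stated in full; the proofs are below) =====
def Claim_equal_find_markers : Prop := ∀ (buf : List Int), Dom_find_markers buf → Spec_find_markers buf (find_markers buf)

-- ===== LEMMAS AND PROOFS =====

-- reference run: the markers found scanning from position i
def specRun (buf : List Int) (i : Nat) : List (Int × Int × Int) :=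
  if i + 3 ≤ buf.length then
    if buf.getD i 0 = 1 ∧ (buf.getD (i + 2) 0 = 1 ∨ buf.getD (i + 2) 0 = 4) then
      ((i : Int), buf.getD (i + 1) 0, buf.getD (i + 2) 0) :: specRun buf (i + 3)
    else specRun buf (i + 1)
  else []
termination_by buf.length - i
decreasing_by all_goals omega

-- candidates at positions ≥ i
def candsFrom (buf : List Int) (i : Nat) : List Nat :=
  (List.range' i (buf.length - 2 - i)).filter (hitB buf)

lemma candsFrom_zero (buf : List Int) :
    candsFrom buf 0 = (List.range (buf.length - 2)).filter (hitB buf) := by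
  simp [candsFrom, List.range_eq_range']

lemma hitB_iff (buf : List Int) (j : Nat) :
    hitB buf j = true ↔
      (buf.getD j 0 = 1 ∧ (buf.getD (j + 2) 0 = 1 ∨ buf.getD (j + 2) 0 = 4)) := by
  simp [hitB]

lemma candsFrom_hit (buf : List Int) (i : Nat) (h : i < buf.length - 2)
    (hb : hitB buf i = true) : candsFrom buf i = i :: candsFrom buf (i + 1) := by
  have hk : buf.length - 2 - i = (buf.length - 2 - (i + 1)) + 1 := by omega
  rw [candsFrom, hk, List.range'_succ, List.filter_cons, hb]
  simp [candsFrom]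

lemma candsFrom_miss (buf : List Int) (i : Nat) (h : i < buf.length - 2)
    (hb : hitB buf i = false) : candsFrom buf i = candsFrom buf (i + 1) := by
  have hk : buf.length - 2 - i = (buf.length - 2 - (i + 1)) + 1 := by omega
  rw [candsFrom, hk, List.range'_succ, List.filter_cons, hb]
  simp [candsFrom]

lemma candsFrom_nil (buf : List Int) (i : Nat) (h : ¬ i < buf.length - 2) :
    candsFrom buf i = [] := by
  simp [candsFrom, show buf.length - 2 - i = 0 by omega]

lemma mem_candsFrom (buf : List Int) (i j : Nat) (h : j ∈ candsFrom buf i) : i ≤ j := by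
  rcases List.mem_filter.mp h with ⟨hr, _⟩
  exact (List.mem_range'_1.mp hr).1

-- a finished goA run is the accumulator followed by the reference run
lemma goA_eq (buf : List Int) : ∀ k i acc, buf.length - i ≤ k →
    goA buf i acc = acc ++ specRun buf i := by
  intro k
  induction k with
  | zero =>
    intro i acc h
    rw [goA, specRun]
    have hb : ¬ (i + 3 ≤ buf.length) := by omega
    rw [if_neg hb, if_neg hb, List.append_nil]
  | succ k ih =>
    intro i acc h
    rw [goA, specRun]
    by_cases hb : i + 3 ≤ buf.length
    · rw [if_pos hb, if_pos hb]
      by_cases h1 : buf.getD i 0 = 1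
      · rw [if_pos h1]
        by_cases h2 : buf.getD (i + 2) 0 = 1 ∨ buf.getD (i + 2) 0 = 4
        · rw [if_pos h2, if_pos ⟨h1, h2⟩, ih (i + 3) _ (by omega)]
          simp
        · rw [if_neg h2, if_neg (fun hc => h2 hc.2)]
          exact ih (i + 1) acc (by omega)
      · rw [if_neg h1, if_neg (fun hc => h1 hc.1)]
        exact ih (i + 1) acc (by omega)
    · rw [if_neg hb, if_neg hb, List.append_nil]

-- the threshold can be raised to any bound below every element of the list
lemma foldl_raise (buf : List Int) (L : List Nat) (t1 t2 : Nat) (acc : List (Int × Int × Int))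
    (hle : t1 ≤ t2) (hall : ∀ j ∈ L, t2 ≤ j) :
    (L.foldl (stepB buf) (acc, t1)).1 = (L.foldl (stepB buf) (acc, t2)).1 := by
  cases L with
  | nil => rfl
  | cons j L' =>
    have hj : t2 ≤ j := hall j (List.mem_cons_self ..)
    simp only [List.foldl_cons, stepB, if_pos (le_trans hle hj), if_pos hj]

-- the greedy pass over candidates ≥ i with threshold t ≥ i reproduces the reference run from t
lemma foldl_eq (buf : List Int) : ∀ k i t acc, buf.length - i ≤ k → i ≤ t →
    ((candsFrom buf i).foldl (stepB buf) (acc, t)).1 = acc ++ specRun buf t := by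
  intro k
  induction k with
  | zero =>
    intro i t acc hk hit
    rw [candsFrom_nil buf i (by omega), specRun,
      if_neg (show ¬ (t + 3 ≤ buf.length) by omega), List.append_nil]
    rfl
  | succ k ih =>
    intro i t acc hk hit
    by_cases hi : i < buf.length - 2
    · cases hb : hitB buf i with
      | false =>
        rw [candsFrom_miss buf i hi hb]
        by_cases ht : i + 1 ≤ t
        · exact ih (i + 1) t acc (by omega) ht
        · have hti : t = i := by omega
          rw [hti]
          rw [foldl_raise buf _ i (i + 1) acc (by omega)
              (fun j hj => mem_candsFrom buf (i + 1) j hj),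
            ih (i + 1) (i + 1) acc (by omega) (le_refl _)]
          have hcond : ¬ (buf.getD i 0 = 1 ∧ (buf.getD (i + 2) 0 = 1 ∨ buf.getD (i + 2) 0 = 4)) := by
            rw [← hitB_iff, hb]; simp
          conv_rhs => rw [specRun, if_pos (show i + 3 ≤ buf.length by omega), if_neg hcond]
      | true =>
        rw [candsFrom_hit buf i hi hb, List.foldl_cons]
        by_cases ht : i + 1 ≤ t
        · rw [show stepB buf (acc, t) i = (acc, t) from if_neg (by omega)]
          exact ih (i + 1) t acc (by omega) ht
        · have hti : t = i := by omega
          rw [hti]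
          rw [show stepB buf (acc, i) i
                = (acc ++ [((i : Int), buf.getD (i + 1) 0, buf.getD (i + 2) 0)], i + 3) from
              if_pos (le_refl i),
            ih (i + 1) (i + 3) _ (by omega) (by omega)]
          have hcond : buf.getD i 0 = 1 ∧ (buf.getD (i + 2) 0 = 1 ∨ buf.getD (i + 2) 0 = 4) :=
            (hitB_iff buf i).mp hb
          conv_rhs => rw [specRun, if_pos (show i + 3 ≤ buf.length by omega), if_pos hcond]
          simp
    · rw [candsFrom_nil buf i hi, specRun,
        if_neg (show ¬ (t + 3 ≤ buf.length) by omega), List.append_nil]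
      rfl

lemma alt_eq (buf : List Int) :
    find_markers_alt buf = ((candsFrom buf 0).foldl (stepB buf) ([], 0)).1 := by
  rw [find_markers_alt, candsFrom_zero]

-- ===== VERDICT (by name: the statement is the Claim_ definition above) =====
theorem find_markers_spec : Claim_equal_find_markers := by
  intro buf _
  unfold Spec_find_markers find_markers
  rw [alt_eq, goA_eq buf buf.length 0 [] (by omega),
    foldl_eq buf buf.length 0 0 [] (by omega) (le_refl _)]
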